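-- pv_equiv track=rewrite | github.com/TuneWifi/wn8test | wn8 maybe.py | wn8_status
-- ===== SOURCE A (Python) =====
-- def wn8_status(wn8):
--     statuses = {
--         (0, 300): "Status: Dark Red (Very Bad)",
--         (300, 450): "Status: Red (Bad)",
--         (450, 650): "Status: Orange (Below Average)",
--         (650, 900): "Status: Yellow (Average)",
--         (900, 1200): "Status: Light Green (Above Average)",
--         (1200, 1600): "Status: Green (Good)",
--         (1600, 2000): "Status: Light Blue (Very Good)",
--         (2000, 2450): "Status: Blue (Great)",
--         (2450, 2900): "Status: Violet (Unicum)",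
--         (2900, 99999): "Status: Dark Violet (Super Unicum)"
--     }
--     for (low, high), status in statuses.items():
--         if low <= wn8 < high:
--             return status
--     return "Status: Unknown"
-- ===== SOURCE B (Python) =====
-- def wn8_status(wn8):
--     thresholds = [0, 300, 450, 650, 900, 1200, 1600, 2000, 2450, 2900, 99999]
--     labels = [
--         "Status: Dark Red (Very Bad)",
--         "Status: Red (Bad)",
--         "Status: Orange (Below Average)",
--         "Status: Yellow (Average)",
--         "Status: Light Green (Above Average)",
--         "Status: Green (Good)",
--         "Status: Light Blue (Very Good)",
--         "Status: Blue (Great)",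
--         "Status: Violet (Unicum)",
--         "Status: Dark Violet (Super Unicum)",
--     ]
--     # binary search: lo ends as bisect_right(thresholds, wn8)
--     lo, hi = 0, len(thresholds)
--     while lo < hi:
--         mid = (lo + hi) // 2
--         if thresholds[mid] <= wn8:
--             lo = mid + 1
--         else:
--             hi = mid
--     idx = lo - 1
--     if idx < 0 or idx >= len(labels):
--         return "Status: Unknown"
--     return labels[idx]
-- ===== Notes on version B (the rewrite author's own statement) =====
-- stated objective: alternative
-- what changed: Replaces the linear scan over ten (low,high) interval keys of a dict with a binary search (hand-rolled bisect_right) over a sorted list of lower thresholds, indexing into a parallel label list.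
import Mathlib
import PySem

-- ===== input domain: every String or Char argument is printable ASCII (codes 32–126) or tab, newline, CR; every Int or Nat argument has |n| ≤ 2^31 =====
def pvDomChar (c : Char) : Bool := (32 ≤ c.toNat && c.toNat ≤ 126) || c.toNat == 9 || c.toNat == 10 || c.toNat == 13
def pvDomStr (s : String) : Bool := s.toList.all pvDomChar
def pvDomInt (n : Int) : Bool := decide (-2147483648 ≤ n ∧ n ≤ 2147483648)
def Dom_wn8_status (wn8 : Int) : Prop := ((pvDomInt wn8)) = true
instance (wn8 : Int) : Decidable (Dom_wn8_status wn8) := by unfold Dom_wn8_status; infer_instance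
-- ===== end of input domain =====

-- B replaces A's linear scan over interval keys with a binary search over sorted lower
-- thresholds plus a parallel label list (objective: alternative algorithm, same exact values).


-- ===== PORT A =====
-- A's dict literal, in insertion order (keys are distinct, so the dict is just this list)
def wn8StatusTable : List ((Int × Int) × String) :=
  [ ((0, 300), "Status: Dark Red (Very Bad)"),
    ((300, 450), "Status: Red (Bad)"),
    ((450, 650), "Status: Orange (Below Average)"),
    ((650, 900), "Status: Yellow (Average)"),
    ((900, 1200), "Status: Light Green (Above Average)"),
    ((1200, 1600), "Status: Green (Good)"),
    ((1600, 2000), "Status: Light Blue (Very Good)"),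
    ((2000, 2450), "Status: Blue (Great)"),
    ((2450, 2900), "Status: Violet (Unicum)"),
    ((2900, 99999), "Status: Dark Violet (Super Unicum)") ]

-- the for-loop: first interval containing wn8 wins, else fall through
def wn8StatusLoop (wn8 : Int) : List ((Int × Int) × String) → String
  | [] => "Status: Unknown"
  | ((low, high), status) :: rest =>
      if low ≤ wn8 ∧ wn8 < high then status else wn8StatusLoop wn8 rest

def wn8_status (wn8 : Int) : String := wn8StatusLoop wn8 wn8StatusTable

-- ===== PORT B =====
def wn8Thresholds : List Int := [0, 300, 450, 650, 900, 1200, 1600, 2000, 2450, 2900, 99999]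

def wn8Labels : List String :=
  [ "Status: Dark Red (Very Bad)",
    "Status: Red (Bad)",
    "Status: Orange (Below Average)",
    "Status: Yellow (Average)",
    "Status: Light Green (Above Average)",
    "Status: Green (Good)",
    "Status: Light Blue (Very Good)",
    "Status: Blue (Great)",
    "Status: Violet (Unicum)",
    "Status: Dark Violet (Super Unicum)" ]

-- the while loop of Source B; thresholds[mid] is always in range (lo ≤ mid < hi ≤ len),
-- so getD is exact for Python's indexing here
def wn8Bisect (wn8 : Int) (lo hi : Nat) : Nat :=
  if lo < hi then
    let mid := (lo + hi) / 2
    if wn8Thresholds.getD mid 0 ≤ wn8 then wn8Bisect wn8 (mid + 1) hi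
    else wn8Bisect wn8 lo mid
  else lo
termination_by hi - lo
decreasing_by all_goals omega

def wn8_status_alt (wn8 : Int) : String :=
  let lo := wn8Bisect wn8 0 wn8Thresholds.length
  let idx : Int := (lo : Int) - 1
  if idx < 0 ∨ idx ≥ (wn8Labels.length : Int) then "Status: Unknown"
  else wn8Labels.getD idx.toNat ""

-- ===== PRECONDITION & SPEC =====
def Spec_wn8_status (wn8 : Int) (out : String) : Prop := out = wn8_status_alt wn8
instance (wn8 : Int) (out : String) : Decidable (Spec_wn8_status wn8 out) := by unfold Spec_wn8_status; infer_instance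

-- ===== CLAIM (what is proved, stated in full; the proofs are below) =====
def Claim_equal_wn8_status : Prop := ∀ (wn8 : Int), Dom_wn8_status wn8 → Spec_wn8_status wn8 (wn8_status wn8)

-- ===== LEMMAS AND PROOFS =====

lemma wn8Bisect_eval_0 (wn8 : Int) (h2 : wn8 < 0) : wn8Bisect wn8 0 11 = 0 := by
  repeat
    rw [wn8Bisect]
    norm_num [wn8Thresholds]
    try first | rw [if_pos (by omega)] | rw [if_neg (by omega)]

lemma wn8Bisect_eval_1 (wn8 : Int) (h1 : (0:Int) ≤ wn8) (h2 : wn8 < 300) : wn8Bisect wn8 0 11 = 1 := by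
  repeat
    rw [wn8Bisect]
    norm_num [wn8Thresholds]
    try first | rw [if_pos (by omega)] | rw [if_neg (by omega)]

lemma wn8Bisect_eval_2 (wn8 : Int) (h1 : (300:Int) ≤ wn8) (h2 : wn8 < 450) : wn8Bisect wn8 0 11 = 2 := by
  repeat
    rw [wn8Bisect]
    norm_num [wn8Thresholds]
    try first | rw [if_pos (by omega)] | rw [if_neg (by omega)]

lemma wn8Bisect_eval_3 (wn8 : Int) (h1 : (450:Int) ≤ wn8) (h2 : wn8 < 650) : wn8Bisect wn8 0 11 = 3 := by
  repeat
    rw [wn8Bisect]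
    norm_num [wn8Thresholds]
    try first | rw [if_pos (by omega)] | rw [if_neg (by omega)]

lemma wn8Bisect_eval_4 (wn8 : Int) (h1 : (650:Int) ≤ wn8) (h2 : wn8 < 900) : wn8Bisect wn8 0 11 = 4 := by
  repeat
    rw [wn8Bisect]
    norm_num [wn8Thresholds]
    try first | rw [if_pos (by omega)] | rw [if_neg (by omega)]

lemma wn8Bisect_eval_5 (wn8 : Int) (h1 : (900:Int) ≤ wn8) (h2 : wn8 < 1200) : wn8Bisect wn8 0 11 = 5 := by
  repeat
    rw [wn8Bisect]
    norm_num [wn8Thresholds]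
    try first | rw [if_pos (by omega)] | rw [if_neg (by omega)]

lemma wn8Bisect_eval_6 (wn8 : Int) (h1 : (1200:Int) ≤ wn8) (h2 : wn8 < 1600) : wn8Bisect wn8 0 11 = 6 := by
  repeat
    rw [wn8Bisect]
    norm_num [wn8Thresholds]
    try first | rw [if_pos (by omega)] | rw [if_neg (by omega)]

lemma wn8Bisect_eval_7 (wn8 : Int) (h1 : (1600:Int) ≤ wn8) (h2 : wn8 < 2000) : wn8Bisect wn8 0 11 = 7 := by
  repeat
    rw [wn8Bisect]
    norm_num [wn8Thresholds]
    try first | rw [if_pos (by omega)] | rw [if_neg (by omega)]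

lemma wn8Bisect_eval_8 (wn8 : Int) (h1 : (2000:Int) ≤ wn8) (h2 : wn8 < 2450) : wn8Bisect wn8 0 11 = 8 := by
  repeat
    rw [wn8Bisect]
    norm_num [wn8Thresholds]
    try first | rw [if_pos (by omega)] | rw [if_neg (by omega)]

lemma wn8Bisect_eval_9 (wn8 : Int) (h1 : (2450:Int) ≤ wn8) (h2 : wn8 < 2900) : wn8Bisect wn8 0 11 = 9 := by
  repeat
    rw [wn8Bisect]
    norm_num [wn8Thresholds]
    try first | rw [if_pos (by omega)] | rw [if_neg (by omega)]

lemma wn8Bisect_eval_10 (wn8 : Int) (h1 : (2900:Int) ≤ wn8) (h2 : wn8 < 99999) : wn8Bisect wn8 0 11 = 10 := by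
  repeat
    rw [wn8Bisect]
    norm_num [wn8Thresholds]
    try first | rw [if_pos (by omega)] | rw [if_neg (by omega)]

lemma wn8Bisect_eval_11 (wn8 : Int) (h1 : (99999:Int) ≤ wn8) : wn8Bisect wn8 0 11 = 11 := by
  repeat
    rw [wn8Bisect]
    norm_num [wn8Thresholds]
    try first | rw [if_pos (by omega)] | rw [if_neg (by omega)]

-- finish one interval: rewrite the bisect result, reduce both sides to literals
-- ===== VERDICT (by name: the statement is the Claim_ definition above) =====
theorem wn8_status_spec : Claim_equal_wn8_status := by
  intro wn8 _
  unfold Spec_wn8_status wn8_status wn8_status_alt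
  by_cases hc0 : wn8 < 0
  · rw [show wn8Thresholds.length = 11 from rfl, wn8Bisect_eval_0 wn8 (by omega)]
    simp only [wn8StatusTable, wn8StatusLoop, wn8Labels]
    norm_num
    repeat first | rw [if_pos (by omega)] | rw [if_neg (by omega)]
    all_goals first | rfl | decide | (intro h; exact absurd (h (by omega)) (by omega))
  by_cases hc1 : (0:Int) ≤ wn8 ∧ wn8 < 300
  · rw [show wn8Thresholds.length = 11 from rfl, wn8Bisect_eval_1 wn8 (by omega) (by omega)]
    simp only [wn8StatusTable, wn8StatusLoop, wn8Labels]
    norm_num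
    repeat first | rw [if_pos (by omega)] | rw [if_neg (by omega)]
    all_goals first | rfl | decide | (intro h; exact absurd (h (by omega)) (by omega))
  by_cases hc2 : (300:Int) ≤ wn8 ∧ wn8 < 450
  · rw [show wn8Thresholds.length = 11 from rfl, wn8Bisect_eval_2 wn8 (by omega) (by omega)]
    simp only [wn8StatusTable, wn8StatusLoop, wn8Labels]
    norm_num
    repeat first | rw [if_pos (by omega)] | rw [if_neg (by omega)]
    all_goals first | rfl | decide | (intro h; exact absurd (h (by omega)) (by omega))
  by_cases hc3 : (450:Int) ≤ wn8 ∧ wn8 < 650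
  · rw [show wn8Thresholds.length = 11 from rfl, wn8Bisect_eval_3 wn8 (by omega) (by omega)]
    simp only [wn8StatusTable, wn8StatusLoop, wn8Labels]
    norm_num
    repeat first | rw [if_pos (by omega)] | rw [if_neg (by omega)]
    all_goals first | rfl | decide | (intro h; exact absurd (h (by omega)) (by omega))
  by_cases hc4 : (650:Int) ≤ wn8 ∧ wn8 < 900
  · rw [show wn8Thresholds.length = 11 from rfl, wn8Bisect_eval_4 wn8 (by omega) (by omega)]
    simp only [wn8StatusTable, wn8StatusLoop, wn8Labels]
    norm_num
    repeat first | rw [if_pos (by omega)] | rw [if_neg (by omega)]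
    all_goals first | rfl | decide | (intro h; exact absurd (h (by omega)) (by omega))
  by_cases hc5 : (900:Int) ≤ wn8 ∧ wn8 < 1200
  · rw [show wn8Thresholds.length = 11 from rfl, wn8Bisect_eval_5 wn8 (by omega) (by omega)]
    simp only [wn8StatusTable, wn8StatusLoop, wn8Labels]
    norm_num
    repeat first | rw [if_pos (by omega)] | rw [if_neg (by omega)]
    all_goals first | rfl | decide | (intro h; exact absurd (h (by omega)) (by omega))
  by_cases hc6 : (1200:Int) ≤ wn8 ∧ wn8 < 1600
  · rw [show wn8Thresholds.length = 11 from rfl, wn8Bisect_eval_6 wn8 (by omega) (by omega)]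
    simp only [wn8StatusTable, wn8StatusLoop, wn8Labels]
    norm_num
    repeat first | rw [if_pos (by omega)] | rw [if_neg (by omega)]
    all_goals first | rfl | decide | (intro h; exact absurd (h (by omega)) (by omega))
  by_cases hc7 : (1600:Int) ≤ wn8 ∧ wn8 < 2000
  · rw [show wn8Thresholds.length = 11 from rfl, wn8Bisect_eval_7 wn8 (by omega) (by omega)]
    simp only [wn8StatusTable, wn8StatusLoop, wn8Labels]
    norm_num
    repeat first | rw [if_pos (by omega)] | rw [if_neg (by omega)]
    all_goals first | rfl | decide | (intro h; exact absurd (h (by omega)) (by omega))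
  by_cases hc8 : (2000:Int) ≤ wn8 ∧ wn8 < 2450
  · rw [show wn8Thresholds.length = 11 from rfl, wn8Bisect_eval_8 wn8 (by omega) (by omega)]
    simp only [wn8StatusTable, wn8StatusLoop, wn8Labels]
    norm_num
    repeat first | rw [if_pos (by omega)] | rw [if_neg (by omega)]
    all_goals first | rfl | decide | (intro h; exact absurd (h (by omega)) (by omega))
  by_cases hc9 : (2450:Int) ≤ wn8 ∧ wn8 < 2900
  · rw [show wn8Thresholds.length = 11 from rfl, wn8Bisect_eval_9 wn8 (by omega) (by omega)]
    simp only [wn8StatusTable, wn8StatusLoop, wn8Labels]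
    norm_num
    repeat first | rw [if_pos (by omega)] | rw [if_neg (by omega)]
    all_goals first | rfl | decide | (intro h; exact absurd (h (by omega)) (by omega))
  by_cases hc10 : (2900:Int) ≤ wn8 ∧ wn8 < 99999
  · rw [show wn8Thresholds.length = 11 from rfl, wn8Bisect_eval_10 wn8 (by omega) (by omega)]
    simp only [wn8StatusTable, wn8StatusLoop, wn8Labels]
    norm_num
    repeat first | rw [if_pos (by omega)] | rw [if_neg (by omega)]
    all_goals first | rfl | decide | (intro h; exact absurd (h (by omega)) (by omega))
  by_cases hc11 : (99999:Int) ≤ wn8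
  · rw [show wn8Thresholds.length = 11 from rfl, wn8Bisect_eval_11 wn8 (by omega)]
    simp only [wn8StatusTable, wn8StatusLoop, wn8Labels]
    norm_num
    repeat first | rw [if_pos (by omega)] | rw [if_neg (by omega)]
    all_goals first | rfl | decide | (intro h; exact absurd (h (by omega)) (by omega))
  exact absurd trivial (by omega)
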